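-- pv_equiv track=rewrite | github.com/sushprova/Figure-Extraction | test1.py | identify_col_gaps
-- ===== SOURCE A (Python) =====
-- def identify_col_gaps(col_sum, white_col_sum):
--     min_gap_col = 3
--     gap_indices = []
--     in_gap = False
--     current_gap_start = None
--
--     for col_index, value in enumerate(col_sum):
--         if value == white_col_sum:
--             if not in_gap:
--                 in_gap = True
--                 current_gap_start = col_index
--         else:
--             if in_gap:
--                 in_gap = False
--                 if (col_index-1 - current_gap_start) > min_gap_col:
--                   gap_indices.append((current_gap_start, col_index - 1))
--                   current_gap_start = None
--
--     if in_gap: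
--         gap_indices.append((current_gap_start, len(col_sum) - 1))
--
--     return gap_indices
-- ===== SOURCE B (Python) =====
-- def identify_col_gaps(col_sum, white_col_sum):
--     # Collect all maximal runs of white columns, then filter:
--     # a run is kept if it reaches the last column (no length test there)
--     # or if it is strictly longer than min_gap_col + 1 columns.
--     n = len(col_sum)
--     runs = []
--     i = 0
--     while i < n:
--         if col_sum[i] == white_col_sum:
--             j = i
--             while j + 1 < n and col_sum[j + 1] == white_col_sum:
--                 j += 1
--             runs.append((i, j))
--             i = j + 1
--         else:
--             i += 1
--     return [(s, e) for (s, e) in runs if e == n - 1 or e - s > 3]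
-- ===== Notes on version B (the rewrite author's own statement) =====
-- stated objective: alternative
-- what changed: Replaces A's single-pass streaming state machine (in_gap flag, gap start, conditional append mid-stream) with a collect-then-filter decomposition: first gather all maximal white runs as (start, end) pairs, then keep a run iff it reaches the last column or is longer than the threshold.
import Mathlib
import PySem

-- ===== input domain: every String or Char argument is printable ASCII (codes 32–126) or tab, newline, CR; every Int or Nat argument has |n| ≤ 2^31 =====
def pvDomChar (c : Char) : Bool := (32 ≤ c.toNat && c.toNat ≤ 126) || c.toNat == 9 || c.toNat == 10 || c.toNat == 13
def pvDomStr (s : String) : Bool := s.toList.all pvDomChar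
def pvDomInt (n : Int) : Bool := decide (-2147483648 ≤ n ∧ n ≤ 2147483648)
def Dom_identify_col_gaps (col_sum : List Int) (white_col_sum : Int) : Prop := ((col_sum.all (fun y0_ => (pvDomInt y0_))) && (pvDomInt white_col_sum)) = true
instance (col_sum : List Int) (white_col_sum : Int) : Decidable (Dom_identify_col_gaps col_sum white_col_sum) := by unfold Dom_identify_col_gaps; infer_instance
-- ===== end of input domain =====

-- B replaces A's streaming gap state machine with a collect-all-white-runs-then-filter
-- decomposition (alternative decomposition, same O(n) cost).

-- ===== PORT A =====
-- A's for-loop over enumerate(col_sum) with state (gap_indices, in_gap, current_gap_start);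
-- current_gap_start = None is Option.none (its value is only read while in_gap, where it is some _).
def pvLoopA (w : Int) : List Int → Int → List (Int × Int) → Bool → Option Int →
    List (Int × Int) × Bool × Option Int
  | [], _, acc, ingap, cur => (acc, ingap, cur)
  | v :: rest, i, acc, ingap, cur =>
    if v == w then
      if !ingap then pvLoopA w rest (i + 1) acc true (some i)
      else pvLoopA w rest (i + 1) acc ingap cur
    else
      if ingap then
        if i - 1 - cur.getD 0 > 3 then
          pvLoopA w rest (i + 1) (acc ++ [(cur.getD 0, i - 1)]) false none
        else pvLoopA w rest (i + 1) acc false cur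
      else pvLoopA w rest (i + 1) acc ingap cur

-- the trailing 'if in_gap: append (start, len-1)'
def pvFinishA (st : List (Int × Int) × Bool × Option Int) (n : Int) : List (Int × Int) :=
  if st.2.1 then st.1 ++ [(st.2.2.getD 0, n - 1)] else st.1

def identify_col_gaps (col_sum : List Int) (white_col_sum : Int) : List (Int × Int) :=
  pvFinishA (pvLoopA white_col_sum col_sum 0 [] false none) (col_sum.length : Int)

-- ===== PORT B =====
-- Source B inner while: length of the extension of the current run (leading whites of the rest)
def pvRunExt (w : Int) : List Int → Nat
  | [] => 0
  | v :: rest => if v == w then pvRunExt w rest + 1 else 0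

-- Source B outer while: collect all maximal white runs as (start, end) pairs
def pvRuns (w : Int) : List Int → Int → List (Int × Int)
  | [], _ => []
  | v :: rest, i =>
    if v == w then
      let k := pvRunExt w rest
      (i, i + (k : Int)) :: pvRuns w (rest.drop k) (i + (k : Int) + 1)
    else
      pvRuns w rest (i + 1)
termination_by l => l.length
decreasing_by
  · simp only [List.length_drop, List.length_cons]; omega
  · simp

def identify_col_gaps_alt (col_sum : List Int) (white_col_sum : Int) : List (Int × Int) :=
  let n : Int := (col_sum.length : Int)
  (pvRuns white_col_sum col_sum 0).filter (fun p => p.2 == n - 1 || p.2 - p.1 > 3)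

-- ===== PRECONDITION & SPEC =====
def Spec_identify_col_gaps (col_sum : List Int) (white_col_sum : Int) (out : List (Int × Int)) : Prop := out = identify_col_gaps_alt col_sum white_col_sum
instance (col_sum : List Int) (white_col_sum : Int) (out : List (Int × Int)) : Decidable (Spec_identify_col_gaps col_sum white_col_sum out) := by unfold Spec_identify_col_gaps; infer_instance

-- ===== CLAIM (what is proved, stated in full; the proofs are below) =====
def Claim_equal_identify_col_gaps : Prop := ∀ (col_sum : List Int) (white_col_sum : Int), Dom_identify_col_gaps col_sum white_col_sum → Spec_identify_col_gaps col_sum white_col_sum (identify_col_gaps col_sum white_col_sum)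

-- ===== LEMMAS AND PROOFS =====

lemma pvRunExt_le (w : Int) (l : List Int) : pvRunExt w l ≤ l.length := by
  induction l with
  | nil => simp [pvRunExt]
  | cons v rest ih => simp only [pvRunExt, List.length_cons]; split <;> omega

-- one-step unfolding lemmas for the two loops
lemma pvLoopA_white_out {w v : Int} (rest : List Int) (i : Int) (acc : List (Int × Int))
    (cur : Option Int) (hv : (v == w) = true) :
    pvLoopA w (v :: rest) i acc false cur = pvLoopA w rest (i + 1) acc true (some i) := by
  simp [pvLoopA, hv]

lemma pvLoopA_white_in {w v : Int} (rest : List Int) (i : Int) (acc : List (Int × Int))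
    (cur : Option Int) (hv : (v == w) = true) :
    pvLoopA w (v :: rest) i acc true cur = pvLoopA w rest (i + 1) acc true cur := by
  simp [pvLoopA, hv]

lemma pvLoopA_nonwhite_in {w v : Int} (rest : List Int) (i : Int) (acc : List (Int × Int))
    (cur : Option Int) (hv : (v == w) = false) :
    pvLoopA w (v :: rest) i acc true cur =
      if i - 1 - cur.getD 0 > 3 then
        pvLoopA w rest (i + 1) (acc ++ [(cur.getD 0, i - 1)]) false none
      else pvLoopA w rest (i + 1) acc false cur := by
  simp [pvLoopA, hv]

lemma pvLoopA_nonwhite_out {w v : Int} (rest : List Int) (i : Int) (acc : List (Int × Int))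
    (cur : Option Int) (hv : (v == w) = false) :
    pvLoopA w (v :: rest) i acc false cur = pvLoopA w rest (i + 1) acc false cur := by
  simp [pvLoopA, hv]

lemma pvRuns_white {w v : Int} (rest : List Int) (i : Int) (hv : (v == w) = true) :
    pvRuns w (v :: rest) i =
      (i, i + (pvRunExt w rest : Int)) ::
        pvRuns w (rest.drop (pvRunExt w rest)) (i + (pvRunExt w rest : Int) + 1) := by
  simp [pvRuns, hv]

lemma pvRuns_nonwhite {w v : Int} (rest : List Int) (i : Int) (hv : (v == w) = false) :
    pvRuns w (v :: rest) i = pvRuns w rest (i + 1) := by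
  simp [pvRuns, hv]

-- while in a gap, A just skips over the white extension of the current run
lemma pvLoopA_skip_white (w : Int) (l : List Int) :
    ∀ (i : Int) (acc : List (Int × Int)) (cur : Option Int),
    pvLoopA w l i acc true cur =
      pvLoopA w (l.drop (pvRunExt w l)) (i + (pvRunExt w l : Int)) acc true cur := by
  induction l with
  | nil => simp [pvRunExt]
  | cons v rest ih =>
    intro i acc cur
    by_cases hv : (v == w) = true
    · rw [pvLoopA_white_in rest i acc cur hv, ih]
      have hext : pvRunExt w (v :: rest) = pvRunExt w rest + 1 := by simp [pvRunExt, hv]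
      rw [hext]
      simp only [List.drop_succ_cons]
      congr 1
      push_cast; ring
    · have hext : pvRunExt w (v :: rest) = 0 := by
        simp [pvRunExt, Bool.eq_false_iff.mpr hv]
      rw [hext]
      simp

lemma pvRunExt_drop_head (w : Int) (l : List Int) :
    ∀ v rest, l.drop (pvRunExt w l) = v :: rest → (v == w) = false := by
  induction l with
  | nil => intro v rest h; simp at h
  | cons a tl ih =>
    intro v rest h
    by_cases ha : (a == w) = true
    · simp only [pvRunExt, if_pos ha, List.drop_succ_cons] at h
      exact ih v rest h
    · simp only [pvRunExt, if_neg ha, List.drop_zero] at h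
      cases h; simpa using ha

-- the invariant: from a not-in-gap state, A's remaining loop plus the trailing append
-- equals the filtered runs of the remaining list (n = i + length of the remaining list)
lemma pvMain (w : Int) : ∀ (N : Nat) (l : List Int), l.length ≤ N →
    ∀ (i : Int) (acc : List (Int × Int)) (cur : Option Int),
    pvFinishA (pvLoopA w l i acc false cur) (i + (l.length : Int)) =
      acc ++ (pvRuns w l i).filter
        (fun p => p.2 == i + (l.length : Int) - 1 || p.2 - p.1 > 3) := by
  intro N
  induction N with
  | zero =>
    intro l hl
    have : l = [] := List.eq_nil_of_length_eq_zero (Nat.le_zero.mp hl)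
    subst this
    intro i acc cur
    simp [pvLoopA, pvFinishA, pvRuns]
  | succ N ih =>
    intro l hl i acc cur
    cases l with
    | nil => simp [pvLoopA, pvFinishA, pvRuns]
    | cons v rest =>
      by_cases hv : (v == w) = true
      · -- the loop enters a gap starting at index i
        rw [pvLoopA_white_out rest i acc cur hv, pvLoopA_skip_white, pvRuns_white rest i hv]
        set k := pvRunExt w rest with hk
        have hkle : k ≤ rest.length := pvRunExt_le w rest
        cases hdrop : rest.drop k with
        | nil =>
          -- the run reaches the end of the list: A appends unconditionally, B's filter
          -- keeps the run because its end is the last index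
          have hkeq : k = rest.length := by
            have := congrArg List.length hdrop
            simp only [List.length_drop, List.length_nil] at this
            omega
          have hend : i + (k : Int) = i + (((v :: rest).length : Nat) : Int) - 1 := by
            simp only [List.length_cons]; push_cast; omega
          simp only [pvLoopA, pvRuns, pvFinishA, List.filter, hend]
          simp
        | cons v' rest2 =>
          -- the run ends at index i+k, followed by a non-white column
          have hv' : (v' == w) = false := pvRunExt_drop_head w rest v' rest2 (by rw [← hk, hdrop])
          have hlens := congrArg List.length hdrop
          simp only [List.length_drop, List.length_cons] at hlens
          rw [pvLoopA_nonwhite_in rest2 _ acc (some i) hv', pvRuns_nonwhite rest2 _ hv']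
          simp only [Option.getD_some]
          rw [show i + 1 + (k : Int) - 1 - i = (k : Int) by ring,
              show i + 1 + (k : Int) - 1 = i + (k : Int) by ring,
              show i + (k : Int) + 1 + 1 = i + 1 + (k : Int) + 1 by ring]
          have hnend : ((i + (k : Int) == i + (((v :: rest).length : Nat) : Int) - 1 : Bool)) = false := by
            simp only [beq_eq_false_iff_ne, ne_eq, List.length_cons]
            push_cast
            omega
          have hlensum : i + 1 + (k : Int) + 1 + (rest2.length : Int) =
              i + (((v :: rest).length : Nat) : Int) := by
            simp only [List.length_cons]
            push_cast
            omega
          by_cases hlong : ((k : Int) > 3)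
          · rw [if_pos hlong]
            have hih := ih rest2 (by simp only [List.length_cons] at hl; omega)
              (i + 1 + (k : Int) + 1) (acc ++ [(i, i + (k : Int))]) none
            rw [hlensum] at hih
            rw [hih]
            simp only [List.filter]
            have hcond : ((i + (k : Int) == i + (((v :: rest).length : Nat) : Int) - 1 : Bool) ||
                (decide (i + (k : Int) - i > 3))) = true := by
              rw [hnend]
              simp only [Bool.false_or, decide_eq_true_eq]
              omega
            rw [hcond]
            simp
          · rw [if_neg hlong]
            have hih := ih rest2 (by simp only [List.length_cons] at hl; omega)
              (i + 1 + (k : Int) + 1) acc (some i)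
            rw [hlensum] at hih
            rw [hih]
            simp only [List.filter]
            have hcond : ((i + (k : Int) == i + (((v :: rest).length : Nat) : Int) - 1 : Bool) ||
                (decide (i + (k : Int) - i > 3))) = false := by
              rw [hnend]
              simp only [Bool.false_or, decide_eq_false_iff_not]
              omega
            rw [hcond]
      · -- not a white column: both sides just move on
        have hv0 : (v == w) = false := Bool.eq_false_iff.mpr hv
        rw [pvLoopA_nonwhite_out rest i acc cur hv0, pvRuns_nonwhite rest i hv0]
        have hih := ih rest (by simp only [List.length_cons] at hl; omega) (i + 1) acc cur
        have hlen : i + 1 + (rest.length : Int) = i + (((v :: rest).length : Nat) : Int) := by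
          simp only [List.length_cons]; push_cast; ring
        rw [hlen] at hih
        rw [hih]

-- ===== VERDICT (by name: the statement is the Claim_ definition above) =====
theorem identify_col_gaps_spec : Claim_equal_identify_col_gaps := by
  intro col_sum w _
  unfold Spec_identify_col_gaps identify_col_gaps identify_col_gaps_alt
  have := pvMain w col_sum.length col_sum (le_refl _) 0 [] none
  simpa using this
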